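-- pv_equiv track=rewrite | github.com/duartejr/revisao_agents | observability/search_metrics.py | update_urls_search_history
-- ===== SOURCE A (Python) =====
-- def update_urls_search_history(
--     old_history: dict[str, int], new_urls: list[str]
-- ) -> dict[str, int]:
--     """Return an updated URL appearance-count mapping after a new search.
--
--     Args:
--         old_history: The existing ``urls_search_history`` from state. Pass an
--             empty dict for the first search.
--         new_urls: URLs returned by the current search. May include URLs already
--             present in ``old_history``; must *not* be the full historical
--             accumulation.
--
--     Returns:
--         A new dict with incremented counts for each URL in ``new_urls``.
--
--     Example:
--         >>> old = {"http://a.com": 1, "http://b.com": 1}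
--         >>> new = ["http://a.com", "http://c.com"]
--         >>> SearchQualityMetrics.update_urls_search_history(old, new)
--         {"http://a.com": 2, "http://b.com": 1, "http://c.com": 1}
--     """
--     from collections import defaultdict
--
--     urls_history = defaultdict(int, old_history or {})
--     for url in new_urls:
--         urls_history[url] += 1
--     return dict(urls_history)
-- ===== SOURCE B (Python) =====
-- def update_urls_search_history(old_history, new_urls):
--     """Two staged passes, no incremental counting: rebuild every existing
--     entry with its count re-tallied by scanning new_urls (list.count), then
--     discover fresh URLs in first-appearance order and tally each the same way."""
--     base = dict(old_history or {})
--     result = {url: count + new_urls.count(url) for url, count in base.items()}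
--     for url in new_urls:
--         if url not in result:
--             result[url] = new_urls.count(url)
--     return result
-- ===== Notes on version B (the rewrite author's own statement) =====
-- stated objective: alternative
-- what changed: B never counts incrementally: it rebuilds each existing entry by re-tallying its URL with a full scan of new_urls (list.count) in one comprehension, then a second pass appends fresh URLs in first-appearance order, each tallied by another scan, instead of A's defaultdict incremented once per raw occurrence.
import Mathlib
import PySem

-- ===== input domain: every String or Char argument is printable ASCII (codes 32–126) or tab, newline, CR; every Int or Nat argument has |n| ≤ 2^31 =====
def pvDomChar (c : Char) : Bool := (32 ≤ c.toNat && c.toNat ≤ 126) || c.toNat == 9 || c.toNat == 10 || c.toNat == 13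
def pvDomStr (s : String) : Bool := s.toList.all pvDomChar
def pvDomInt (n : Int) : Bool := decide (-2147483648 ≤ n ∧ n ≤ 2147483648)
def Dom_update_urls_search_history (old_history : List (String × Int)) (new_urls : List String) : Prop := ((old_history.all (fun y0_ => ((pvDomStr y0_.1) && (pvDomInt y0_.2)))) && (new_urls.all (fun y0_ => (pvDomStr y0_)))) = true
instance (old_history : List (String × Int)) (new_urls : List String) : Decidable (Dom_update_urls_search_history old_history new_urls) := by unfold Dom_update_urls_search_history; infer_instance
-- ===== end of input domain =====

-- B replaces A's one-increment-per-occurrence defaultdict loop by two staged passes that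
-- re-tally each distinct URL with full scans of new_urls (list.count); alternative
-- decomposition, same return value (return value only; neither mutates its arguments).

-- ===== PORT A =====
-- urls_history = defaultdict(int, old_history or {}); for url in new_urls: urls_history[url] += 1; return dict(urls_history)
def update_urls_search_history (old_history : List (String × Int)) (new_urls : List String) : List (String × Int) :=
  let urls_history := new_urls.foldl (fun d url => d.modify url 0 (fun x => x + 1)) (PySem.Dict.ofList old_history)
  urls_history.items

-- ===== PORT B =====
-- base = dict(old_history or {})
-- result = {url: count + new_urls.count(url) for url, count in base.items()}
-- for url in new_urls:
--     if url not in result: result[url] = new_urls.count(url)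
-- return result
def update_urls_search_history_alt (old_history : List (String × Int)) (new_urls : List String) : List (String × Int) :=
  let base := PySem.Dict.ofList old_history
  let result := PySem.Dict.ofList (base.items.map (fun p => (p.1, p.2 + (new_urls.count p.1 : Int))))
  let result := new_urls.foldl
    (fun d url => if d.contains url then d else d.insert url ((new_urls.count url : Int))) result
  result.items

-- ===== PRECONDITION & SPEC =====
def Spec_update_urls_search_history (old_history : List (String × Int)) (new_urls : List String) (out : List (String × Int)) : Prop := out = update_urls_search_history_alt old_history new_urls
instance (old_history : List (String × Int)) (new_urls : List String) (out : List (String × Int)) : Decidable (Spec_update_urls_search_history old_history new_urls out) := by unfold Spec_update_urls_search_history; infer_instance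

-- ===== CLAIM =====
def Claim_equal_update_urls_search_history : Prop := ∀ (old_history : List (String × Int)) (new_urls : List String), Dom_update_urls_search_history old_history new_urls → Spec_update_urls_search_history old_history new_urls (update_urls_search_history old_history new_urls)

-- ===== LEMMAS AND PROOFS =====

-- the keys after B's conditional-insert pass: the old keys updated (set-wise) with l.
theorem keys_foldl_cond_insert (c : String → Int) (l : List String) (d : PySem.Dict String Int) :
    (l.foldl (fun d u => if d.contains u then d else d.insert u (c u)) d).keys
      = PySem.Set.update d.keys l := by
  induction l generalizing d with
  | nil => simp [PySem.Set.update]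
  | cons u l ih =>
    rw [List.foldl_cons, PySem.Set.update_cons]
    by_cases h : d.contains u = true
    · rw [if_pos h, ih, PySem.Set.add_of_mem ((PySem.Dict.contains_iff_mem_keys d u).mp h)]
    · rw [if_neg h, ih, PySem.Dict.keys_insert_of_not_contains d (c u) (by simpa using h),
        PySem.Set.add_of_not_mem
          (fun hm => h ((PySem.Dict.contains_iff_mem_keys d u).mpr hm))]

-- the value after B's conditional-insert pass.
theorem getD_foldl_cond_insert (c : String → Int) (l : List String) (d : PySem.Dict String Int)
    (v : String) :
    (l.foldl (fun d u => if d.contains u then d else d.insert u (c u)) d).getD v 0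
      = if d.contains v then d.getD v 0 else if v ∈ l then c v else 0 := by
  induction l generalizing d with
  | nil =>
    simp only [List.foldl_nil, List.not_mem_nil, if_false]
    split_ifs with h
    · rfl
    · have h0 : d.get? v = none := by
        rw [PySem.Dict.get?_eq_none_iff_not_mem_keys]
        exact fun hm => h ((PySem.Dict.contains_iff_mem_keys d v).mpr hm)
      simp [PySem.Dict.getD, h0]
  | cons u l ih =>
    rw [List.foldl_cons]
    by_cases hu : d.contains u = true
    · rw [if_pos hu, ih]
      by_cases hv : d.contains v = true
      · simp [hv]
      · have hvu : v ≠ u := fun e => hv (e ▸ hu)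
        simp [hv, hvu]
    · rw [if_neg hu, ih]
      by_cases hvu : v = u
      · subst hvu
        simp [hu]
      · simp [PySem.Dict.contains_insert, PySem.Dict.getD_insert, hvu,
          beq_iff_eq]

-- B's comprehension dict: its items are exactly the rebuilt old items.
theorem items_comprehension (old_history : List (String × Int)) (new_urls : List String) :
    (PySem.Dict.ofList
        ((PySem.Dict.ofList old_history).items.map
          (fun p => (p.1, p.2 + (new_urls.count p.1 : Int))))).items
      = (PySem.Dict.ofList old_history).items.map
          (fun p => (p.1, p.2 + (new_urls.count p.1 : Int))) := by
  have hnd := PySem.Dict.nodup_keys_ofList (κ := String) (ν := Int) old_history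
  show ((((PySem.Dict.ofList old_history).items.map
      (fun p => (p.1, p.2 + (new_urls.count p.1 : Int)))).foldl
      (fun acc p => acc.insert p.1 p.2) PySem.Dict.empty)).items = _
  rw [List.foldl_map]
  rw [PySem.Dict.items_foldl_insert_fresh (PySem.Dict.ofList old_history).items
      (fun p => p.1) (fun p => p.2 + (new_urls.count p.1 : Int)) PySem.Dict.empty
      (fun _ _ => PySem.Dict.contains_empty _) (by simpa [PySem.Dict.keys] using hnd)]
  rfl

-- keys of the comprehension dict = keys of base.
theorem keys_comprehension (old_history : List (String × Int)) (new_urls : List String) :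
    (PySem.Dict.ofList
        ((PySem.Dict.ofList old_history).items.map
          (fun p => (p.1, p.2 + (new_urls.count p.1 : Int))))).keys
      = (PySem.Dict.ofList old_history).keys := by
  simp [PySem.Dict.keys, items_comprehension old_history new_urls]

-- value in the comprehension dict.
theorem getD_comprehension (old_history : List (String × Int)) (new_urls : List String)
    (v : String) :
    (PySem.Dict.ofList
        ((PySem.Dict.ofList old_history).items.map
          (fun p => (p.1, p.2 + (new_urls.count p.1 : Int))))).getD v 0
      = if v ∈ (PySem.Dict.ofList old_history).keys
        then (PySem.Dict.ofList old_history).getD v 0 + (new_urls.count v : Int)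
        else 0 := by
  set base := PySem.Dict.ofList old_history with hbase
  set M := PySem.Dict.ofList (base.items.map (fun p => (p.1, p.2 + (new_urls.count p.1 : Int)))) with hM
  have hndb : base.keys.Nodup := PySem.Dict.nodup_keys_ofList old_history
  have hitems : M.items = base.items.map (fun p => (p.1, p.2 + (new_urls.count p.1 : Int))) :=
    items_comprehension old_history new_urls
  have hkeys : M.keys = base.keys := keys_comprehension old_history new_urls
  have hndM : M.keys.Nodup := hkeys ▸ hndb
  by_cases hv : v ∈ base.keys
  · rw [if_pos hv]
    obtain ⟨w, hw⟩ : ∃ w, base.get? v = some w := by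
      rcases Option.eq_none_or_eq_some (base.get? v) with h | h
      · exact absurd ((PySem.Dict.get?_eq_none_iff_not_mem_keys base v).mp h) (not_not.mpr hv)
      · exact h
    have hmem : (v, w) ∈ base.items := (PySem.Dict.get?_eq_some_iff_mem_items base v w hndb).mp hw
    have hmemM : (v, w + (new_urls.count v : Int)) ∈ M.items := by
      rw [hitems]
      exact List.mem_map.mpr ⟨(v, w), hmem, rfl⟩
    rw [PySem.Dict.getD_of_mem_items M hmemM hndM 0]
    have : base.getD v 0 = w := by simp [PySem.Dict.getD, hw]
    rw [this]
  · rw [if_neg hv]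
    have : M.get? v = none :=
      (PySem.Dict.get?_eq_none_iff_not_mem_keys M v).mpr (by rwa [hkeys])
    simp [PySem.Dict.getD, this]

-- the two result dicts coincide.
theorem update_urls_search_history_dict_eq (old_history : List (String × Int))
    (new_urls : List String) :
    (new_urls.foldl (fun d url => d.modify url 0 (fun x => x + 1)) (PySem.Dict.ofList old_history))
      = (new_urls.foldl
          (fun d url => if d.contains url then d else d.insert url ((new_urls.count url : Int)))
          (PySem.Dict.ofList
            ((PySem.Dict.ofList old_history).items.map
              (fun p => (p.1, p.2 + (new_urls.count p.1 : Int)))))) := by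
  set base := PySem.Dict.ofList old_history with hbase
  set M := PySem.Dict.ofList (base.items.map (fun p => (p.1, p.2 + (new_urls.count p.1 : Int)))) with hM
  have hndb : base.keys.Nodup := PySem.Dict.nodup_keys_ofList old_history
  have hkeysM : M.keys = base.keys := keys_comprehension old_history new_urls
  have hkeysA : (new_urls.foldl (fun d url => d.modify url 0 (fun x => x + 1)) base).keys
      = PySem.Set.update base.keys new_urls :=
    PySem.Dict.keys_foldl_modify new_urls 0 (fun _ _ => (fun x => x + 1)) base
  have hkeysB : (new_urls.foldl
      (fun d url => if d.contains url then d else d.insert url ((new_urls.count url : Int))) M).keys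
      = PySem.Set.update base.keys new_urls := by
    rw [keys_foldl_cond_insert (fun u => (new_urls.count u : Int)) new_urls M, hkeysM]
  have hndu : (PySem.Set.update base.keys new_urls).Nodup :=
    PySem.Set.nodup_update base.keys new_urls hndb
  apply PySem.Dict.ext
  rw [PySem.Dict.items_eq_map_keys _ (hkeysA ▸ hndu) 0,
      PySem.Dict.items_eq_map_keys _ (hkeysB ▸ hndu) 0, hkeysA, hkeysB]
  apply List.map_congr_left
  intro k _
  rw [PySem.Dict.getD_foldl_modify_add_one,
      getD_foldl_cond_insert (fun u => (new_urls.count u : Int)) new_urls M k,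
      getD_comprehension old_history new_urls k]
  by_cases hk : k ∈ base.keys
  · have hc : M.contains k = true := (PySem.Dict.contains_iff_mem_keys M k).mpr (hkeysM ▸ hk)
    simp [hc, hk, ← hbase]
  · have hc : M.contains k = false := by
      by_contra h
      exact hk (hkeysM ▸ (PySem.Dict.contains_iff_mem_keys M k).mp (by simpa using h))
    have hb0 : base.get? k = none := (PySem.Dict.get?_eq_none_iff_not_mem_keys base k).mpr hk
    by_cases hkn : k ∈ new_urls
    · simp [hc, hkn, PySem.Dict.getD, hb0]
    · simp [hc, hkn, PySem.Dict.getD, hb0, List.count_eq_zero.mpr hkn]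

-- ===== VERDICT =====
theorem update_urls_search_history_spec : Claim_equal_update_urls_search_history := by
  intro old_history new_urls _
  unfold Spec_update_urls_search_history update_urls_search_history update_urls_search_history_alt
  simp only []
  rw [update_urls_search_history_dict_eq]
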